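-- pv_equiv track=rewrite | github.com/damien-neveu/algo-study | arrays/locate_smallest_sortable_window.py | index_of_last_elem_greater_than_last_known_min
-- ===== SOURCE A (Python) =====
-- def index_of_last_elem_greater_than_last_known_min(arr):
--     res = None
--     last_known_min = arr[len(arr) - 1]
--     for i in reversed(list(range(len(arr)))):
--         if arr[i] > last_known_min:
--             res = i
--         else:
--             last_known_min = arr[i]
--     return res
-- ===== SOURCE B (Python) =====
-- def index_of_last_elem_greater_than_last_known_min(arr):
--     n = len(arr)
--     sm = [arr[n - 1]]
--     for i in range(n - 2, -1, -1):
--         sm.append(min(arr[i], sm[-1]))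
--     sm.reverse()
--     for i in range(n - 1):
--         if arr[i] > sm[i + 1]:
--             return i
--     return None
-- ===== Notes on version B (the rewrite author's own statement) =====
-- stated objective: alternative
-- what changed: Replaces A's single fused right-to-left pass (running min + result overwriting) by building an explicit suffix-minimum table and then a separate forward scan that returns the first index i with arr[i] > sm[i+1].
-- outside the precondition, e.g. on index_of_last_elem_greater_than_last_known_min([]): A raises IndexError, B raises IndexError
import Mathlib
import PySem

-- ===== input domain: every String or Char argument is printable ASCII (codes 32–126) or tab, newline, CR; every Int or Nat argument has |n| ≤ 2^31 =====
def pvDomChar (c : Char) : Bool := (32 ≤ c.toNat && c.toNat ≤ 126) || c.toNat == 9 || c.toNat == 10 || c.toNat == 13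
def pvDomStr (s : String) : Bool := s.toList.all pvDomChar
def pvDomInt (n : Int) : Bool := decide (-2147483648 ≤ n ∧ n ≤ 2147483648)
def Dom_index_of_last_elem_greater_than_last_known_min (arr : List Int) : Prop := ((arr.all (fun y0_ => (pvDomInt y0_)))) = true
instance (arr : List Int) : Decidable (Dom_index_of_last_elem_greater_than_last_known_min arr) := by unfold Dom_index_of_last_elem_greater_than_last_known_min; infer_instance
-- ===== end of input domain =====

-- B replaces A's single fused right-to-left pass by an explicit suffix-minimum table plus a
-- separate forward scan returning the first index i with arr[i] > sm[i+1]; same cost, different decomposition.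


-- ===== PORT A =====
-- res = None; last_known_min = arr[len(arr)-1]; for i in reversed(range(len(arr))): …
def index_of_last_elem_greater_than_last_known_min (arr : List Int) : Option Int :=
  let n : Int := arr.length
  let st := ((PySem.List.pyRange 0 n 1).reverse).foldl
    (fun (st : Option Int × Int) (i : Int) =>
      if PySem.List.pyGetD arr i 0 > st.2 then (some i, st.2)
      else (st.1, PySem.List.pyGetD arr i 0))
    (none, PySem.List.pyGetD arr (n - 1) 0)
  st.1

-- ===== PORT B =====
-- build sm (suffix minima, back to front), reverse it, then forward-scan for the first hit
def index_of_last_elem_greater_than_last_known_min_alt (arr : List Int) : Option Int :=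
  let n : Int := arr.length
  let sm := (PySem.List.pyRange (n - 2) (-1) (-1)).foldl
    (fun (sm : List Int) (i : Int) =>
      sm ++ [min (PySem.List.pyGetD arr i 0) (PySem.List.pyGetD sm (-1) 0)])
    [PySem.List.pyGetD arr (n - 1) 0]
  let smr := sm.reverse
  (PySem.List.pyRange 0 (n - 1) 1).find?
    (fun i => decide (PySem.List.pyGetD arr i 0 > PySem.List.pyGetD smr (i + 1) 0))

-- ===== PRECONDITION & SPEC =====
-- Pre_ excludes only the empty list, on which both programs raise IndexError (arr[n-1]).
def Pre_index_of_last_elem_greater_than_last_known_min (arr : List Int) : Prop := arr ≠ []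
instance (arr : List Int) : Decidable (Pre_index_of_last_elem_greater_than_last_known_min arr) := by unfold Pre_index_of_last_elem_greater_than_last_known_min; infer_instance
def pvWitness_index_of_last_elem_greater_than_last_known_min : List Int := [3, 1, 2]

def Spec_index_of_last_elem_greater_than_last_known_min (arr : List Int) (out : Option Int) : Prop := out = index_of_last_elem_greater_than_last_known_min_alt arr
instance (arr : List Int) (out : Option Int) : Decidable (Spec_index_of_last_elem_greater_than_last_known_min arr out) := by unfold Spec_index_of_last_elem_greater_than_last_known_min; infer_instance

-- ===== CLAIM (what is proved, stated in full; the proofs are below) =====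
def Claim_equal_index_of_last_elem_greater_than_last_known_min : Prop := ∀ (arr : List Int), Dom_index_of_last_elem_greater_than_last_known_min arr → Pre_index_of_last_elem_greater_than_last_known_min arr → Spec_index_of_last_elem_greater_than_last_known_min arr (index_of_last_elem_greater_than_last_known_min arr)

-- ===== LEMMAS AND PROOFS =====

-- suffix minimum of arr from index i on (meaningful for i < arr.length)
def pvSmin (a : List Int) (i : Nat) : Int :=
  if h : i + 1 < a.length then min (a.getD i 0) (pvSmin a (i + 1)) else a.getD i 0
termination_by a.length - i

-- structural mirror of A's loop, indices j, j-1, …, 0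
def pvAfold (a : List Int) : Nat → Option Int → Int → Option Int
  | 0, res, lkm => if a.getD 0 0 > lkm then some 0 else res
  | j + 1, res, lkm =>
      if a.getD (j + 1) 0 > lkm then pvAfold a j (some ((j + 1 : Nat) : Int)) lkm
      else pvAfold a j res (a.getD (j + 1) 0)

-- forward scan: first i ≤ j with a[i] > smin (i+1)
def pvFscan (a : List Int) : Nat → Option Int
  | 0 => if a.getD 0 0 > pvSmin a 1 then some 0 else none
  | j + 1 =>
      match pvFscan a j with
      | some i => some i
      | none => if a.getD (j + 1) 0 > pvSmin a (j + 1 + 1) then some ((j + 1 : Nat) : Int) else none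

theorem pvA_fold_eq (a : List Int) (j : Nat) (res : Option Int) (lkm : Int) :
    ((PySem.List.pyRange (j : Int) (-1) (-1)).foldl
      (fun (st : Option Int × Int) (i : Int) =>
        if PySem.List.pyGetD a i 0 > st.2 then (some i, st.2)
        else (st.1, PySem.List.pyGetD a i 0)) (res, lkm)).1 = pvAfold a j res lkm := by
  induction j generalizing res lkm with
  | zero =>
      rw [PySem.List.pyRange_neg_one_cons (by norm_num)]
      rw [show ((0 : Nat) : Int) - 1 = -1 by norm_num, PySem.List.pyRange_neg_one_eq_nil le_rfl]
      simp only [List.foldl_cons, List.foldl_nil, PySem.List.pyGetD_natCast, pvAfold]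
      split <;> simp
  | succ j ih =>
      rw [PySem.List.pyRange_neg_one_cons (by exact_mod_cast Int.lt_of_lt_of_le (by norm_num) (Int.natCast_nonneg (j+1)))]
      rw [show ((j + 1 : Nat) : Int) - 1 = (j : Int) by push_cast; ring]
      simp only [List.foldl_cons, PySem.List.pyGetD_natCast, pvAfold]
      by_cases h : a.getD (j + 1) 0 > lkm
      · rw [if_pos h, if_pos h]; exact ih _ _
      · rw [if_neg h, if_neg h]; exact ih _ _

theorem pvAfold_res (a : List Int) (j : Nat) (res : Option Int) (lkm : Int) :
    pvAfold a j res lkm =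
      match pvAfold a j none lkm with
      | some i => some i
      | none => res := by
  induction j generalizing res lkm with
  | zero => simp only [pvAfold]; split <;> simp
  | succ j ih =>
      simp only [pvAfold]
      by_cases h : a.getD (j + 1) 0 > lkm
      · rw [if_pos h, if_pos h, ih (some _)]
        rcases pvAfold a j none lkm with _ | i <;> simp
      · rw [if_neg h, if_neg h, ih res, ih none]

theorem pvSmin_last (a : List Int) (i : Nat) (h : ¬ i + 1 < a.length) :
    pvSmin a i = a.getD i 0 := by rw [pvSmin, dif_neg h]

theorem pvSmin_step (a : List Int) (i : Nat) (h : i + 1 < a.length) :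
    pvSmin a i = min (a.getD i 0) (pvSmin a (i + 1)) := by rw [pvSmin, dif_pos h]

theorem pvAfold_eq_fscan (a : List Int) (j : Nat) (h : j + 1 < a.length) :
    pvAfold a j none (pvSmin a (j + 1)) = pvFscan a j := by
  induction j with
  | zero => simp [pvAfold, pvFscan]
  | succ j ih =>
      have hj : j + 1 < a.length := Nat.lt_of_succ_lt h
      simp only [pvAfold, pvFscan]
      have hstep : pvSmin a (j + 1) = min (a.getD (j + 1) 0) (pvSmin a (j + 1 + 1)) :=
        pvSmin_step a (j + 1) h
      by_cases hc : a.getD (j + 1) 0 > pvSmin a (j + 1 + 1)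
      · rw [if_pos hc]
        have hm : pvSmin a (j + 1 + 1) = pvSmin a (j + 1) := by omega
        rw [pvAfold_res, hm, ih hj]
        have hc' : a.getD (j + 1) 0 > pvSmin a (j + 1) := by omega
        rcases pvFscan a j with _ | i <;> simp only []
        rw [if_pos hc']
      · rw [if_neg hc]
        have hm : pvSmin a (j + 1) = a.getD (j + 1) 0 := by omega
        rw [← hm, ih hj]
        have hle : ¬ pvSmin a (j + 1) > pvSmin a (j + 1 + 1) := by omega
        rcases pvFscan a j with _ | i <;> simp only []
        rw [if_neg hle]

theorem pvB_sm_eq (a : List Int) (j : Nat) (acc : List Int) (hne : acc ≠ [])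
    (hlast : acc.getLast hne = pvSmin a (j + 1)) (hj : j + 1 < a.length) :
    (PySem.List.pyRange (j : Int) (-1) (-1)).foldl
      (fun (sm : List Int) (i : Int) =>
        sm ++ [min (PySem.List.pyGetD a i 0) (PySem.List.pyGetD sm (-1) 0)]) acc
    = acc ++ ((List.range (j + 1)).map (pvSmin a)).reverse := by
  induction j generalizing acc with
  | zero =>
      rw [PySem.List.pyRange_neg_one_cons (by norm_num)]
      rw [show ((0 : Nat) : Int) - 1 = -1 by norm_num, PySem.List.pyRange_neg_one_eq_nil le_rfl]
      simp only [List.foldl_cons, List.foldl_nil]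
      rw [PySem.List.pyGetD_neg_one acc 0 hne, hlast,
        show PySem.List.pyGetD a ((0 : Nat) : Int) 0 = a.getD 0 0 from PySem.List.pyGetD_natCast a 0 0]
      rw [← pvSmin_step a 0 hj]
      simp
  | succ j ih =>
      rw [PySem.List.pyRange_neg_one_cons (by exact_mod_cast Int.lt_of_lt_of_le (by norm_num) (Int.natCast_nonneg (j+1)))]
      rw [show ((j + 1 : Nat) : Int) - 1 = (j : Int) by push_cast; ring]
      simp only [List.foldl_cons]
      rw [PySem.List.pyGetD_neg_one acc 0 hne, hlast,
        show PySem.List.pyGetD a ((j + 1 : Nat) : Int) 0 = a.getD (j + 1) 0 from PySem.List.pyGetD_natCast a (j+1) 0]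
      rw [← pvSmin_step a (j + 1) hj]
      have hne' : acc ++ [pvSmin a (j + 1)] ≠ [] := by simp
      rw [ih (acc ++ [pvSmin a (j + 1)]) hne' (by simp) (Nat.lt_of_succ_lt hj)]
      rw [List.append_assoc]
      congr 1
      simp [List.range_succ]

theorem pvB_find_eq (a : List Int) (j : Nat) (h : j + 1 < a.length) :
    (PySem.List.pyRange 0 ((j : Int) + 1) 1).find?
      (fun i => decide (PySem.List.pyGetD a i 0 > PySem.List.pyGetD ((List.range a.length).map (pvSmin a)) (i + 1) 0))
    = pvFscan a j := by
  induction j with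
  | zero =>
      rw [show ((0 : Nat) : Int) + 1 = 0 + 1 by norm_num, PySem.List.pyRange_one_singleton]
      simp only [List.find?]
      rw [show ((0 : Int) + 1) = ((1 : Nat) : Int) by norm_num]
      rw [PySem.List.pyGetD_natCast ((List.range a.length).map (pvSmin a)) 1 0]
      rw [PySem.List.pyGetD_zero]
      rw [show ((List.range a.length).map (pvSmin a)).getD 1 0 = pvSmin a 1 by
        rw [List.getD_eq_getElem?_getD, List.getElem?_map,
          List.getElem?_range (by omega : 1 < a.length)]; simp]
      simp only [pvFscan]
      split <;> simp_all
  | succ j ih =>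
      rw [show ((j + 1 : Nat) : Int) + 1 = ((j : Int) + 1) + 1 by push_cast; ring,
        PySem.List.pyRange_one_succ_right (by positivity), List.find?_append,
        ih (Nat.lt_of_succ_lt h)]
      simp only [pvFscan]
      rcases pvFscan a j with _ | i
      · simp only [Option.none_or, List.find?]
        rw [show ((j : Int) + 1) = ((j + 1 : Nat) : Int) by push_cast; ring]
        rw [show ((j + 1 : Nat) : Int) + 1 = ((j + 1 + 1 : Nat) : Int) by push_cast; ring]
        rw [PySem.List.pyGetD_natCast a (j + 1) 0,
          PySem.List.pyGetD_natCast ((List.range a.length).map (pvSmin a)) (j + 1 + 1) 0]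
        rw [show ((List.range a.length).map (pvSmin a)).getD (j + 1 + 1) 0 = pvSmin a (j + 1 + 1) by
          rw [List.getD_eq_getElem?_getD, List.getElem?_map,
            List.getElem?_range (by omega : j + 1 + 1 < a.length)]; simp]
        split <;> simp_all
      · simp

-- ===== VERDICT (by name: the statement is the Claim_ definition above) =====
theorem index_of_last_elem_greater_than_last_known_min_spec : Claim_equal_index_of_last_elem_greater_than_last_known_min := by
  intro arr _ hpre
  unfold Spec_index_of_last_elem_greater_than_last_known_min
  simp only [index_of_last_elem_greater_than_last_known_min,
    index_of_last_elem_greater_than_last_known_min_alt]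
  obtain ⟨m, hlen⟩ : ∃ m, arr.length = m + 1 := by
    cases arr with
    | nil => exact absurd rfl hpre
    | cons y ys => exact ⟨ys.length, rfl⟩
  have h1 : (PySem.List.pyRange 0 ((arr.length : Int)) 1).reverse
      = PySem.List.pyRange ((arr.length : Int) - 1) (-1) (-1) := by
    rw [PySem.List.pyRange_neg_one_eq_reverse]; norm_num
  rw [h1, show ((arr.length : Int) - 1) = ((m : Nat) : Int) by rw [hlen]; push_cast; ring]
  rw [PySem.List.pyGetD_natCast arr m 0]
  rw [pvA_fold_eq arr m none (arr.getD m 0)]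
  have hsm : arr.getD m 0 = pvSmin arr m := (pvSmin_last arr m (by omega)).symm
  rw [hsm]
  cases m with
  | zero =>
      rw [show ((arr.length : Int) - 2) = -1 by rw [hlen]; norm_num,
        PySem.List.pyRange_neg_one_eq_nil (by norm_num),
        PySem.List.pyRange_one_eq_nil (by norm_num : ((0 : Nat) : Int) ≤ 0)]
      simp [pvAfold, pvSmin_last arr 0 (by omega)]
  | succ k =>
      have hk1 : k + 1 < arr.length := by omega
      have hA : pvAfold arr (k + 1) none (pvSmin arr (k + 1)) = pvFscan arr k := by
        simp only [pvAfold]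
        rw [← pvSmin_last arr (k + 1) (by omega)]
        rw [if_neg (lt_irrefl _), pvAfold_eq_fscan arr k hk1]
      rw [hA]
      rw [show ((arr.length : Int) - 2) = ((k : Nat) : Int) by rw [hlen]; push_cast; ring]
      rw [pvB_sm_eq arr k [pvSmin arr (k + 1)] (by simp) (by simp) hk1]
      have hrev : ([pvSmin arr (k + 1)] ++ ((List.range (k + 1)).map (pvSmin arr)).reverse).reverse
          = (List.range arr.length).map (pvSmin arr) := by
        rw [List.reverse_append, List.reverse_reverse]
        simp [hlen, List.range_succ]
      rw [hrev, show (((k + 1 : Nat)) : Int) = ((k : Nat) : Int) + 1 by push_cast; ring]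
      exact (pvB_find_eq arr k hk1).symm
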